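-- pv_equiv track=rewrite | github.com/k22900/-25.07.30- | Python3/프로그래머스/1/140108. 문자열 나누기/문자열 나누기.py | solution
-- ===== SOURCE A (Python) =====
-- def solution(s):
--     answer = 0
--
--     sCnt=0
--     oCnt=0
--
--     x=None
--     for w in s:
--         if x is None:
--             x=w
--             sCnt+=1
--         else:
--             if x==w:
--                 sCnt+=1
--             else:
--                 oCnt+=1
--         if sCnt==oCnt:
--             x=None
--             answer+=1
--             sCnt=oCnt=0
--     if x is None:
--         return answer
--     else:
--         answer+=1
--         return answer
-- ===== SOURCE B (Python) =====
-- def solution(s):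
--     answer = 0
--     i = 0
--     n = len(s)
--     while i < n:
--         first = s[i]
--         seg = n - i
--         for L in range(2, n - i + 1, 2):
--             if 2 * s[i:i+L].count(first) == L:
--                 seg = L
--                 break
--         i += seg
--         answer += 1
--     return answer
-- ===== Notes on version B (the rewrite author's own statement) =====
-- stated objective: alternative
-- what changed: Replaced A's flat single pass with an x=None sentinel and running same/other counters by a window-recount scanner: for each segment start it probes even window lengths L = 2, 4, ... and cuts at the first window whose slice-count of the first character is exactly L/2, keeping no running counter at all.
import Mathlib
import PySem

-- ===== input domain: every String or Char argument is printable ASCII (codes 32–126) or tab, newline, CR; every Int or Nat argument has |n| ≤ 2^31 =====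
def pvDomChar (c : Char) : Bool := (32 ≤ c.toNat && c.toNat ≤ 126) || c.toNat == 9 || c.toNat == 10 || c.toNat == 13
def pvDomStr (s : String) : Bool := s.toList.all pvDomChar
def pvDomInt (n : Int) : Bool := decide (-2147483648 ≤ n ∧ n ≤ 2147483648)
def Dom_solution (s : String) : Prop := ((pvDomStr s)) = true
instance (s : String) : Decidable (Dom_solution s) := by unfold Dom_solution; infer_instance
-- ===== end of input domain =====

-- B replaces A's flat sentinel-state balance loop by a window-recount scanner: for each
-- segment start it probes even window lengths L = 2,4,… and cuts where the first char
-- fills exactly half of the window (no running counter); alternative decomposition, not faster.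

-- ===== PORT A =====
-- one step of A's for-loop; state = (answer, sCnt, oCnt, x)
def solutionStep (st : Int × Int × Int × Option Char) (w : Char) : Int × Int × Int × Option Char :=
  let st' :=
    match st.2.2.2 with
    | none => (st.1, st.2.1 + 1, st.2.2.1, some w)
    | some c =>
      if c == w then (st.1, st.2.1 + 1, st.2.2.1, some c)
      else (st.1, st.2.1, st.2.2.1 + 1, some c)
  if st'.2.1 = st'.2.2.1 then (st'.1 + 1, 0, 0, none) else st'

def solution (s : String) : Int :=
  let st := s.toList.foldl solutionStep (0, 0, 0, none)
  match st.2.2.2 with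
  | none => st.1
  | some _ => st.1 + 1

-- ===== PORT B =====
-- B's inner for-loop over 'range(2, n-i+1, 2)' with break: returns the first even window
-- length L with '2 * s[i:i+L].count(first) == L', else the default 'seg = n - i'
def segScan (cs : List Char) (first : Char) (i : Int) (dflt : Int) : List Int → Int
  | [] => dflt
  | L :: Ls =>
    if 2 * ((PySem.List.slice cs (some i) (some (i + L))).count first : Int) = L then L
    else segScan cs first i dflt Ls

-- the inner loop's result is ≥ 1 (needed for the outer while-loop's termination)
theorem segScan_pos (cs : List Char) (first : Char) (i dflt : Int) (hd : 1 ≤ dflt)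
    (Ls : List Int) (hLs : ∀ L ∈ Ls, 1 ≤ L) : 1 ≤ segScan cs first i dflt Ls := by
  induction Ls with
  | nil => exact hd
  | cons L Ls ih =>
    simp only [segScan]
    split
    · exact hLs L (by simp)
    · exact ih (fun x hx => hLs x (by simp [hx]))

-- B's outer while-loop: 'while i < n: … i += seg; answer += 1'
def outerScan (cs : List Char) (n : Nat) (i : Nat) (answer : Int) : Int :=
  if h : i < n then
    let first := cs.getD i ' '   -- s[i]; exact: the loop guard gives i < n = len(s)
    let seg := segScan cs first (i : Int) ((n : Int) - (i : Int))
      (PySem.List.pyRange 2 ((n : Int) - (i : Int) + 1) 2)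
    outerScan cs n (i + seg.toNat) (answer + 1)
  else answer
termination_by n - i
decreasing_by
  have h1 : 1 ≤ segScan cs (cs.getD i ' ') (i : Int) ((n : Int) - (i : Int))
      (PySem.List.pyRange 2 ((n : Int) - (i : Int) + 1) 2) := by
    apply segScan_pos
    · omega
    · intro L hL
      have := (PySem.List.mem_pyRange_iff_of_pos (by norm_num : (0:Int) < 2) L).mp hL
      omega
  omega

def solution_alt (s : String) : Int := outerScan s.toList s.toList.length 0 0

-- ===== PRECONDITION & SPEC =====
def Spec_solution (s : String) (out : Int) : Prop := out = solution_alt s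
instance (s : String) (out : Int) : Decidable (Spec_solution s out) := by unfold Spec_solution; infer_instance

-- ===== CLAIM (what is proved, stated in full; the proofs are below) =====
def Claim_equal_solution : Prop := ∀ (s : String), Dom_solution s → Spec_solution s (solution s)

-- ===== LEMMAS AND PROOFS =====

-- upper bound on the inner loop's result
theorem segScan_le (cs : List Char) (first : Char) (i dflt : Int) (M : Int) (hd : dflt ≤ M)
    (Ls : List Int) (hLs : ∀ L ∈ Ls, L ≤ M) : segScan cs first i dflt Ls ≤ M := by
  induction Ls with
  | nil => exact hd
  | cons L Ls ih =>
    simp only [segScan]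
    split
    · exact hLs L (by simp)
    · exact ih (fun x hx => hLs x (by simp [hx]))

-- step-2 range unfolding (counted-up form of PySem.List.pyRange_of_pos)
theorem pyRange_two_nil (a b : Int) (h : b ≤ a) : PySem.List.pyRange a b 2 = [] := by
  rw [PySem.List.pyRange_of_pos _ _ (by norm_num)]
  simp [if_neg (by omega : ¬ a < b)]

theorem pyRange_two_cons (a b : Int) (h : a < b) :
    PySem.List.pyRange a b 2 = a :: PySem.List.pyRange (a + 2) b 2 := by
  rw [PySem.List.pyRange_of_pos _ _ (by norm_num), PySem.List.pyRange_of_pos _ _ (by norm_num)]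
  have hN : ((b - a + 2 - 1) / 2).toNat = ((b - (a + 2) + 2 - 1) / 2).toNat + 1 := by omega
  rw [if_pos h, hN]
  by_cases h2 : a + 2 < b
  · rw [if_pos h2, List.range_succ_eq_map]
    simp [List.map_map, Function.comp]
    intro k _
    ring
  · rw [if_neg h2]
    have : ((b - (a + 2) + 2 - 1) / 2).toNat = 0 := by omega
    rw [this]
    simp

-- proof-side model of a single segment of A: consume chars with a balance counter,
-- stop after the char on which it returns to 0
def segB (first : Char) (cnt : Int) : List Char → List Char
  | [] => []
  | w :: rest =>
    let cnt' := if w == first then cnt + 1 else cnt - 1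
    if cnt' = 0 then rest else segB first cnt' rest

theorem segB_length_le (first : Char) (cnt : Int) (l : List Char) :
    (segB first cnt l).length ≤ l.length := by
  induction l generalizing cnt with
  | nil => simp [segB]
  | cons w rest ih =>
    simp only [segB]
    split
    all_goals split
    all_goals first
      | exact Nat.le_succ _
      | exact le_trans (ih _) (Nat.le_succ _)

-- proof-side model of the segment structure: one count per segment
def outerB : List Char → Int
  | [] => 0
  | w :: rest => 1 + outerB (segB w 1 rest)
termination_by l => l.length
decreasing_by exact Nat.lt_succ_of_le (segB_length_le _ _ _)

-- finish of A: +1 iff a segment is open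
def finA (st : Int × Int × Int × Option Char) : Int :=
  match st.2.2.2 with
  | none => st.1
  | some _ => st.1 + 1

-- A = outerB: invariants of A's fold, by strong induction on the list length.
theorem solA_invariant (n : ℕ) :
    (∀ l : List Char, l.length ≤ n → ∀ a : Int,
        finA (l.foldl solutionStep (a, 0, 0, none)) = a + outerB l) ∧
    (∀ l : List Char, l.length ≤ n → ∀ (first : Char) (sCnt oCnt a : Int), oCnt < sCnt →
        finA (l.foldl solutionStep (a, sCnt, oCnt, some first)) =
          a + 1 + outerB (segB first (sCnt - oCnt) l)) := by
  induction n with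
  | zero =>
    constructor
    · intro l hl a
      rw [List.length_eq_zero_iff.mp (Nat.le_zero.mp hl)]
      simp [finA, outerB]
    · intro l hl first sCnt oCnt a h
      rw [List.length_eq_zero_iff.mp (Nat.le_zero.mp hl)]
      simp [finA, segB, outerB]
  | succ n ih =>
    have inner : ∀ l : List Char, l.length ≤ n + 1 →
        ∀ (first : Char) (sCnt oCnt a : Int), oCnt < sCnt →
        finA (l.foldl solutionStep (a, sCnt, oCnt, some first)) =
          a + 1 + outerB (segB first (sCnt - oCnt) l) := by
      intro l hl first sCnt oCnt a h
      match l with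
      | [] => simp [finA, segB, outerB]
      | w :: rest =>
        have hr : rest.length ≤ n := Nat.lt_succ_iff.mp hl
        simp only [List.foldl_cons, solutionStep, segB]
        by_cases hw : first = w
        · subst hw
          simp only [beq_self_eq_true, if_true]
          rw [if_neg (by omega : ¬ sCnt + 1 = oCnt),
              if_neg (by omega : ¬ sCnt - oCnt + 1 = 0),
              ih.2 rest hr first (sCnt + 1) oCnt a (by omega)]
          have e : sCnt + 1 - oCnt = sCnt - oCnt + 1 := by ring
          rw [e]
        · have h1 : (first == w) = false := beq_eq_false_iff_ne.mpr hw
          have h2 : (w == first) = false := beq_eq_false_iff_ne.mpr (fun e => hw e.symm)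
          simp only [h1, h2]
          show finA (List.foldl solutionStep
              (if sCnt = oCnt + 1 then (a + 1, 0, 0, none) else (a, sCnt, oCnt + 1, some first)) rest) =
            a + 1 + outerB (if sCnt - oCnt - 1 = 0 then rest else segB first (sCnt - oCnt - 1) rest)
          by_cases hz : sCnt = oCnt + 1
          · rw [if_pos (by omega : sCnt = oCnt + 1),
                if_pos (by omega : sCnt - oCnt - 1 = 0),
                ih.1 rest hr (a + 1)]
          · rw [if_neg hz, if_neg (by omega : ¬ sCnt - oCnt - 1 = 0),
                ih.2 rest hr first sCnt (oCnt + 1) a (by omega)]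
            have e : sCnt - (oCnt + 1) = sCnt - oCnt - 1 := by ring
            rw [e]
    constructor
    · intro l hl a
      match l with
      | [] => simp [finA, outerB]
      | w :: rest =>
        have hr : rest.length ≤ n + 1 := Nat.le_of_succ_le_succ hl |>.trans (Nat.le_succ n)
        simp only [List.foldl_cons, solutionStep]
        rw [if_neg (by omega : ¬ (0 : Int) + 1 = 0)]
        rw [inner rest hr w (0 + 1) 0 a (by omega)]
        simp only [outerB]
        ring_nf
    · exact inner

-- one-step prefix extension: take (j+1) = take j ++ [t[j]]
theorem take_succ_of_drop {t : List Char} {j : Nat} {x : Char} {r : List Char}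
    (h : t.drop j = x :: r) : t.take (j + 1) = t.take j ++ [x] := by
  have hx : t[j]? = some x := by
    rw [← List.head?_drop, h]; rfl
  rw [List.take_add_one, hx]; rfl

-- CRUX: B's window-recount inner loop cuts the segment exactly where A's balance hits 0.
-- Invariant at pair k: c is the balance after the first 2k+1 chars of the segment first::t.
theorem crux (cs : List Char) (i : Nat) (first : Char) (t : List Char)
    (h0 : cs.drop i = first :: t) :
    ∀ m k : Nat, ∀ c : Int, m = t.length - 2 * k → 2 * k ≤ t.length →
      c = 2 * ((((first :: t).take (2 * k + 1)).count first : Int)) - (2 * k + 1) → 1 ≤ c →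
      segB first c (t.drop (2 * k)) =
        (first :: t).drop (segScan cs first (i : Int) ((t.length : Int) + 1)
          (PySem.List.pyRange (2 * (k : Int) + 2) ((t.length : Int) + 2) 2)).toNat := by
  intro m
  induction m using Nat.strong_induction_on with
  | _ m IH =>
    intro k c hm hk hc hc1
    have hdl : (t.drop (2 * k)).length = t.length - 2 * k := List.length_drop
    cases hd : t.drop (2 * k) with
    | nil =>
      have hk2 : t.length = 2 * k := by
        have := List.drop_eq_nil_iff.mp hd; omega
      rw [pyRange_two_nil _ _ (by omega)]
      simp only [segScan]
      have h1 : ((t.length : Int) + 1).toNat = t.length + 1 := by omega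
      rw [h1, List.drop_of_length_le (by simp)]
      simp [segB]
    | cons a u1 =>
      rw [hd] at hdl
      simp only [List.length_cons] at hdl
      have hdrop1 : (first :: t).drop (2 * k + 1) = a :: u1 := by
        rw [show 2 * k + 1 = (2 * k) + 1 from rfl, List.drop_succ_cons]; exact hd
      have htk2 : (first :: t).take (2 * k + 2) = (first :: t).take (2 * k + 1) ++ [a] :=
        take_succ_of_drop hdrop1
      have hslice : PySem.List.slice cs (some (i : Int)) (some ((i : Int) + (2 * (k : Int) + 2)))
          = (first :: t).take (2 * k + 2) := by
        have e : (2 * (k : Int) + 2) = ((2 * k + 2 : Nat) : Int) := by push_cast; ring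
        rw [e, PySem.List.slice_natCast_add, h0]
      have hcnt2 : (((first :: t).take (2 * k + 2)).count first : Int)
          = (((first :: t).take (2 * k + 1)).count first : Int)
            + (if a = first then 1 else 0) := by
        rw [htk2, List.count_append, List.count_singleton']
        split <;> push_cast <;> ring
      -- range head for this window
      have hrcons : PySem.List.pyRange (2 * (k : Int) + 2) ((t.length : Int) + 2) 2
          = (2 * (k : Int) + 2) :: PySem.List.pyRange (2 * (k : Int) + 4) ((t.length : Int) + 2) 2 := by
        have := pyRange_two_cons (2 * (k : Int) + 2) ((t.length : Int) + 2) (by omega)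
        rw [this]; ring_nf
      rw [hrcons]
      simp only [segScan, hslice]
      cases u1 with
      | nil =>
        -- exactly one char left: both the found window and the default consume everything
        simp only [List.length_nil] at hdl
        have hk2 : t.length = 2 * k + 1 := by omega
        have hrnil : PySem.List.pyRange (2 * (k : Int) + 4) ((t.length : Int) + 2) 2 = [] :=
          pyRange_two_nil _ _ (by omega)
        rw [hrnil]
        simp only [segScan]
        have hall : ∀ r : Int, r = 2 * (k : Int) + 2 ∨ r = (t.length : Int) + 1 →
            (first :: t).drop r.toNat = [] := by
          intro r hr
          apply List.drop_of_length_le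
          simp only [List.length_cons]
          omega
        split
        · rw [hall _ (Or.inl rfl)]; simp [segB]
        · rw [hall _ (Or.inr rfl)]; simp [segB]
      | cons b u' =>
        simp only [List.length_cons] at hdl
        have hdt : t.drop (2 * k + 2) = u' := by
          have h2 := congrArg (List.drop 2) hd
          rw [List.drop_drop] at h2
          simpa using h2
        have hdrop2 : (first :: t).drop (2 * k + 2) = b :: u' := by
          have : (first :: t).drop (2 * k + 2) = ((first :: t).drop (2 * k + 1)).drop 1 := by
            rw [List.drop_drop]
          rw [this, hdrop1]; rfl
        by_cases ha : a = first
        · -- a matches: balance goes up; window condition is false (c + 1 ≠ 0)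
          have hcond : ¬ (2 * (((first :: t).take (2 * k + 2)).count first : Int)
              = 2 * (k : Int) + 2) := by
            rw [hcnt2, if_pos ha]; omega
          rw [if_neg hcond]
          -- segB consumes a and b
          simp only [segB, ha, beq_self_eq_true, if_true]
          rw [if_neg (by omega : ¬ c + 1 = 0)]
          by_cases hb : b = first
          · simp only [hb, beq_self_eq_true, if_true]
            rw [if_neg (by omega : ¬ c + 1 + 1 = 0)]
            have htk3 : (first :: t).take (2 * k + 3) = (first :: t).take (2 * k + 2) ++ [b] :=
              take_succ_of_drop hdrop2
            have := IH (m - 2) (by omega) (k + 1) (c + 2) (by omega) (by omega)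
              (by
                have hcnt2' := hcnt2
                rw [if_pos ha] at hcnt2'
                rw [show 2 * (k + 1) + 1 = 2 * k + 3 from by ring, htk3,
                    List.count_append, List.count_singleton', if_pos hb]
                push_cast
                omega) (by omega)
            rw [show (2 * (k + 1) : Nat) = 2 * k + 2 from by ring, hdt] at this
            push_cast at this
            rw [show c + 1 + 1 = c + 2 from by ring, this]
            ring_nf
          · simp only [beq_iff_eq, if_neg hb]
            rw [if_neg (by omega : ¬ c + 1 - 1 = 0)]
            have htk3 : (first :: t).take (2 * k + 3) = (first :: t).take (2 * k + 2) ++ [b] :=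
              take_succ_of_drop hdrop2
            have := IH (m - 2) (by omega) (k + 1) (c) (by omega) (by omega)
              (by
                have hcnt2' := hcnt2
                rw [if_pos ha] at hcnt2'
                rw [show 2 * (k + 1) + 1 = 2 * k + 3 from by ring, htk3,
                    List.count_append, List.count_singleton', if_neg hb]
                push_cast
                omega) (by omega)
            rw [show (2 * (k + 1) : Nat) = 2 * k + 2 from by ring, hdt] at this
            push_cast at this
            rw [show c + 1 - 1 = c from by ring, this]
            ring_nf
        · -- a differs: balance goes down; window closes iff c = 1
          by_cases hc1' : c = 1
          · have hcond : (2 * (((first :: t).take (2 * k + 2)).count first : Int)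
                = 2 * (k : Int) + 2) := by
              rw [hcnt2, if_neg ha]; omega
            rw [if_pos hcond]
            simp only [segB, beq_iff_eq, if_neg ha]
            rw [if_pos (by omega : c - 1 = 0)]
            have : (2 * (k : Int) + 2).toNat = 2 * k + 2 := by omega
            rw [this, hdrop2]
          · have hcond : ¬ (2 * (((first :: t).take (2 * k + 2)).count first : Int)
                = 2 * (k : Int) + 2) := by
              rw [hcnt2, if_neg ha]; omega
            rw [if_neg hcond]
            simp only [segB, beq_iff_eq, if_neg ha]
            rw [if_neg (by omega : ¬ c - 1 = 0)]
            -- c is odd (from the invariant), so c ≥ 3 here and both next balances stay ≥ 1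
            have hodd : c - 1 ≥ 2 := by omega
            by_cases hb : b = first
            · simp only [hb, if_true]
              rw [if_neg (by omega : ¬ c - 1 + 1 = 0)]
              have htk3 : (first :: t).take (2 * k + 3) = (first :: t).take (2 * k + 2) ++ [b] :=
                take_succ_of_drop hdrop2
              have := IH (m - 2) (by omega) (k + 1) (c) (by omega) (by omega)
                (by
                have hcnt2' := hcnt2
                rw [if_neg ha] at hcnt2'
                rw [show 2 * (k + 1) + 1 = 2 * k + 3 from by ring, htk3,
                    List.count_append, List.count_singleton', if_pos hb]
                push_cast
                omega) (by omega)
              rw [show (2 * (k + 1) : Nat) = 2 * k + 2 from by ring, hdt] at this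
              push_cast at this
              rw [show c - 1 + 1 = c from by ring, this]
              ring_nf
            · simp only [if_neg hb]
              rw [if_neg (by omega : ¬ c - 1 - 1 = 0)]
              have htk3 : (first :: t).take (2 * k + 3) = (first :: t).take (2 * k + 2) ++ [b] :=
                take_succ_of_drop hdrop2
              have := IH (m - 2) (by omega) (k + 1) (c - 2) (by omega) (by omega)
                (by
                have hcnt2' := hcnt2
                rw [if_neg ha] at hcnt2'
                rw [show 2 * (k + 1) + 1 = 2 * k + 3 from by ring, htk3,
                    List.count_append, List.count_singleton', if_neg hb]
                push_cast
                omega) (by omega)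
              rw [show (2 * (k + 1) : Nat) = 2 * k + 2 from by ring, hdt] at this
              push_cast at this
              rw [show c - 1 - 1 = c - 2 from by ring, this]
              ring_nf

-- outer loops agree
theorem outer_eq (cs : List Char) : ∀ m i : Nat, ∀ ans : Int, m = cs.length - i → i ≤ cs.length →
    outerScan cs cs.length i ans = ans + outerB (cs.drop i) := by
  intro m
  induction m using Nat.strong_induction_on with
  | _ m IH =>
    intro i ans hm hi
    rw [outerScan]
    by_cases h : i < cs.length
    · rw [dif_pos h]
      obtain ⟨first, t, h0⟩ : ∃ f t, cs.drop i = f :: t := by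
        cases hdd : cs.drop i with
        | nil => exact absurd (List.drop_eq_nil_iff.mp hdd) (by omega)
        | cons f t => exact ⟨f, t, rfl⟩
      have hlen : t.length + 1 = cs.length - i := by
        have := congrArg List.length h0
        simp only [List.length_drop, List.length_cons] at this
        omega
      have hfirst : cs.getD i ' ' = first := by
        have hx : cs[i]? = some first := by rw [← List.head?_drop, h0]; rfl
        simp [List.getD_eq_getElem?_getD, hx]
      have hc1 : ((cs.length : Int) - (i : Int)) = (t.length : Int) + 1 := by omega
      rw [hfirst, hc1, show ((t.length : Int) + 1 + 1) = (t.length : Int) + 2 from by ring]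
      have hcrux := crux cs i first t h0 t.length 0 1 (by omega) (by omega)
        (by simp) (by norm_num)
      norm_num at hcrux
      show outerScan cs cs.length
          (i + (segScan cs first (i : Int) ((t.length : Int) + 1)
            (PySem.List.pyRange 2 ((t.length : Int) + 2) 2)).toNat) (ans + 1)
        = ans + outerB (cs.drop i)
      set res := segScan cs first (i : Int) ((t.length : Int) + 1)
        (PySem.List.pyRange 2 ((t.length : Int) + 2) 2) with hres
      have hpos : 1 ≤ res := by
        apply segScan_pos
        · omega
        · intro L hL
          have := (PySem.List.mem_pyRange_iff_of_pos (by norm_num : (0:Int) < 2) L).mp hL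
          omega
      have hle : res ≤ (t.length : Int) + 1 := by
        apply segScan_le _ _ _ _ ((t.length : Int) + 1) le_rfl
        intro L hL
        have := (PySem.List.mem_pyRange_iff_of_pos (by norm_num : (0:Int) < 2) L).mp hL
        omega
      have hih := IH (cs.length - (i + res.toNat)) (by omega) (i + res.toNat) (ans + 1)
        rfl (by omega)
      rw [hih]
      have hdd : cs.drop (i + res.toNat) = (first :: t).drop res.toNat := by
        rw [← h0, List.drop_drop]
      rw [hdd, h0, ← hcrux]
      have : outerB (first :: t) = 1 + outerB (segB first 1 t) := by
        simp only [outerB]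
      rw [this]
      ring
    · rw [dif_neg h]
      rw [List.drop_of_length_le (by omega)]
      simp only [outerB]
      ring

-- ===== VERDICT (by name: the statement is the Claim_ definition above) =====
theorem solution_spec : Claim_equal_solution := by
  intro s _
  unfold Spec_solution solution solution_alt
  have hA := (solA_invariant s.toList.length).1 s.toList le_rfl 0
  have hB := outer_eq s.toList s.toList.length 0 0 (by omega) (by omega)
  simp only [List.drop_zero] at hB
  rw [hB]
  simpa [finA] using hA
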